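-- pv_equiv track=rewrite | github.com/Romaa7/my-app | Q7.page 121.py | count_letters_at_odd_indices
-- ===== SOURCE A (Python) =====
-- def count_letters_at_odd_indices(input_string):
--     input_string = "".join(input_string.split()).lower()
--     letter_counts = {}
--     for i in range(1, len(input_string), 2):
--         letter = input_string[i]
--         if letter.isalpha():
--             letter_counts[letter] = letter_counts.get(letter, 0) + 1
--     return letter_counts
-- ===== SOURCE B (Python) =====
-- def count_letters_at_odd_indices(input_string):
--     counts = {}
--     odd = False
--     for c in input_string:
--         if c.isspace():
--             continue
--         if odd:
--             ch = c.lower()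
--             if ch.isalpha():
--                 counts[ch] = counts.get(ch, 0) + 1
--         odd = not odd
--     return counts
-- ===== Notes on version B (the rewrite author's own statement) =====
-- stated objective: alternative
-- what changed: Instead of building a whitespace-stripped lowercased copy of the string and then indexing it at 1,3,5,..., B makes a single fused pass over the original string with a boolean parity flag over non-whitespace characters, lowercasing and counting a character exactly when the flag is odd.
import Mathlib
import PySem

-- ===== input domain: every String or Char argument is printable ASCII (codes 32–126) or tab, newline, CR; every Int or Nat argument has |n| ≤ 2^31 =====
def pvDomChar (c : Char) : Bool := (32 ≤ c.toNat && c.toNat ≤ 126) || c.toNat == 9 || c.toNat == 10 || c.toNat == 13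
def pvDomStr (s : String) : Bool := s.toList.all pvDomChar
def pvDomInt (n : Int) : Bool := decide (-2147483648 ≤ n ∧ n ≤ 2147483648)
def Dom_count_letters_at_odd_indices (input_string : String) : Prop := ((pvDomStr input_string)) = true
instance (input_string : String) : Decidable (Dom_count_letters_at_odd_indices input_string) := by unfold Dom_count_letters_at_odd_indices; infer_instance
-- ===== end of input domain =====

-- B replaces A's compact-then-index two-phase scan by one fused pass with a boolean
-- parity flag over non-whitespace characters (alternative decomposition, same cost).

-- ===== PORT A =====
def count_letters_at_odd_indices (input_string : String) : List (String × Int) :=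
  -- input_string = "".join(input_string.split()).lower()
  let s : List Char := PySem.Chars.lower (PySem.Chars.join [] (PySem.Chars.split₀ input_string.toList))
  -- for i in range(1, len(s), 2): letter = s[i]; if letter.isalpha(): counts[letter] = counts.get(letter, 0) + 1
  ((PySem.List.pyRange 1 (s.length : Int) 2).foldl
    (fun (d : PySem.Dict String Int) i =>
      match PySem.List.pyGet? s i with
      | some letter =>
        if PySem.Chars.isalpha letter then
          d.insert (String.ofList [letter]) (d.getD (String.ofList [letter]) 0 + 1)
        else d
      | none => d)
    PySem.Dict.empty).items

-- ===== PORT B =====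
def count_letters_at_odd_indices_alt (input_string : String) : List (String × Int) :=
  ((input_string.toList.foldl
    (fun (st : Bool × PySem.Dict String Int) c =>
      if PySem.Chars.isspace c then st
      else
        let d := if st.1 then
            (let ch := PySem.Chars.lowerChar c
             if PySem.Chars.isalpha ch then
               st.2.insert (String.ofList [ch]) (st.2.getD (String.ofList [ch]) 0 + 1)
             else st.2)
          else st.2
        (!st.1, d))
    (false, PySem.Dict.empty)).2).items

-- ===== PRECONDITION & SPEC =====
def Spec_count_letters_at_odd_indices (input_string : String) (out : List (String × Int)) : Prop := out = count_letters_at_odd_indices_alt input_string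
instance (input_string : String) (out : List (String × Int)) : Decidable (Spec_count_letters_at_odd_indices input_string out) := by unfold Spec_count_letters_at_odd_indices; infer_instance

-- ===== CLAIM (what is proved, stated in full; the proofs are below) =====
def Claim_equal_count_letters_at_odd_indices : Prop := ∀ (input_string : String), Dom_count_letters_at_odd_indices input_string → Spec_count_letters_at_odd_indices input_string (count_letters_at_odd_indices input_string)

-- ===== LEMMAS AND PROOFS =====

-- the common counting step on an (already lowercased) character
def pvStep (d : PySem.Dict String Int) (letter : Char) : PySem.Dict String Int :=
  if PySem.Chars.isalpha letter then
    d.insert (String.ofList [letter]) (d.getD (String.ofList [letter]) 0 + 1)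
  else d

-- elements at odd 0-based positions
def pvOdd {α : Type} : List α → List α
  | [] => []
  | [_] => []
  | _ :: b :: r => b :: pvOdd r

theorem pvOdd_map {α β : Type} (f : α → β) : ∀ (u : List α), pvOdd (u.map f) = (pvOdd u).map f := by
  intro u
  induction u using pvOdd.induct <;> simp [pvOdd, *]

-- "".join(parts) is the concatenation
theorem pv_join_nil (parts : List (List Char)) : PySem.Chars.join [] parts = parts.flatten := by
  simp [PySem.Chars.join]
  induction parts with
  | nil => simp [List.intercalate]
  | cons p ps ih =>
    cases ps with
    | nil => simp [List.intercalate]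
    | cons q qs =>
      simp [List.intercalate, List.intersperse] at *
      simpa using ih

theorem pv_split₀_go_flatten : ∀ (l cur : List Char) (acc : List (List Char)),
    (PySem.Chars.split₀.go l cur acc).flatten
      = acc.reverse.flatten ++ cur.reverse ++ l.filter (fun c => !PySem.Chars.isspace c) := by
  intro l
  induction l with
  | nil =>
    intro cur acc
    by_cases h : cur.isEmpty
    · simp [PySem.Chars.split₀.go, h]
      simp [List.isEmpty_iff] at h
      simp [h]
    · simp [PySem.Chars.split₀.go, h]
  | cons c rest ih =>
    intro cur acc
    by_cases hs : PySem.Chars.isspace c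
    · by_cases h : cur.isEmpty
      · simp [PySem.Chars.split₀.go, hs, h, ih]
        simp [List.isEmpty_iff] at h
        simp [h]
      · simp [PySem.Chars.split₀.go, hs, h, ih]
    · simp [PySem.Chars.split₀.go, hs, ih]

-- the compacted string of A is the whitespace-filtered input
theorem pv_compact (l : List Char) :
    PySem.Chars.join [] (PySem.Chars.split₀ l) = l.filter (fun c => !PySem.Chars.isspace c) := by
  rw [pv_join_nil, PySem.Chars.split₀, pv_split₀_go_flatten]
  simp

-- range(1, n+2, 2) = 1 :: (range(1, n, 2) shifted by 2)
theorem pv_pyRange2_shift (n : Nat) :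
    PySem.List.pyRange 1 ((n : Int) + 2) 2 = 1 :: (PySem.List.pyRange 1 (n : Int) 2).map (· + 2) := by
  rw [PySem.List.pyRange_of_pos _ _ (by norm_num), PySem.List.pyRange_of_pos _ _ (by norm_num)]
  have h1 : (1 : Int) < (n : Int) + 2 := by omega
  have hc1 : (((n : Int) + 2 - 1 + 2 - 1) / 2).toNat = n / 2 + 1 := by omega
  have hc0 : (if (1 : Int) < (n : Int) then (((n : Int) - 1 + 2 - 1) / 2).toNat else 0) = n / 2 := by
    split_ifs with h
    · omega
    · omega
  rw [if_pos h1, hc1, hc0, List.range_succ_eq_map]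
  simp [List.map_map]
  intro a _
  ring

-- indexing the odd positions of t along range(1, len t, 2) yields pvOdd t
theorem pv_map_range_odd {α : Type} (dflt : α) :
    ∀ (t : List α), (PySem.List.pyRange 1 (t.length : Int) 2).map
        (fun i => PySem.List.pyGetD t i dflt) = pvOdd t := by
  intro t
  induction t using pvOdd.induct with
  | case1 =>
    simp [pvOdd]
    rw [PySem.List.pyRange_of_pos _ _ (by norm_num)]
    norm_num
  | case2 a =>
    simp [pvOdd]
    rw [PySem.List.pyRange_of_pos _ _ (by norm_num)]
    norm_num
  | case3 a b r ih =>
    have hlen : ((a :: b :: r).length : Int) = (r.length : Int) + 2 := by simp; omega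
    rw [hlen, pv_pyRange2_shift, pvOdd]
    simp only [List.map_cons, List.map_map]
    congr 1
    · rw [PySem.List.pyGetD_ofNat' (a :: b :: r) 1 dflt]
      simp
    · rw [← ih]
      apply List.map_congr_left
      intro i hi
      obtain ⟨h1i, h2i, -⟩ := (PySem.List.mem_pyRange_iff_of_pos (by norm_num : (0:Int) < 2) i).mp hi
      simp only [Function.comp_apply]
      rw [PySem.List.pyGetD_eq_getElem (a :: b :: r) (i := i + 2) dflt (by omega) (by simp; omega),
          PySem.List.pyGetD_eq_getElem r (i := i) dflt (by omega) (by omega)]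
      have h2 : (i + 2).toNat = i.toNat + 2 := by omega
      simp [h2]

-- B's filtered fold with the parity flag computes the fold of pvStep ∘ lowerChar over pvOdd
theorem pv_parity_fold :
    ∀ (u : List Char) (d : PySem.Dict String Int),
      (u.foldl (fun (st : Bool × PySem.Dict String Int) c =>
          (!st.1, if st.1 then pvStep st.2 (PySem.Chars.lowerChar c) else st.2)) (false, d)).2
        = (pvOdd u).foldl (fun d c => pvStep d (PySem.Chars.lowerChar c)) d := by
  intro u
  induction u using pvOdd.induct with
  | case1 => intro d; simp [pvOdd]
  | case2 a => intro d; simp [pvOdd]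
  | case3 a b r ih => intro d; simpa [pvOdd] using ih (pvStep d (PySem.Chars.lowerChar b))

-- ===== VERDICT (by name: the statement is the Claim_ definition above) =====
theorem count_letters_at_odd_indices_spec : Claim_equal_count_letters_at_odd_indices := by
  intro input_string _
  unfold Spec_count_letters_at_odd_indices count_letters_at_odd_indices count_letters_at_odd_indices_alt
  set l := input_string.toList with hl
  set u := l.filter (fun c => !PySem.Chars.isspace c) with hu
  -- A's compacted lowered string
  have hs : PySem.Chars.lower (PySem.Chars.join [] (PySem.Chars.split₀ l)) = u.map PySem.Chars.lowerChar := by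
    rw [pv_compact]
    rfl
  simp only [hs]
  congr 1
  -- rewrite A's fold body into pvStep of the indexed element
  have hbody : (PySem.List.pyRange 1 ((u.map PySem.Chars.lowerChar).length : Int) 2).foldl
      (fun (d : PySem.Dict String Int) i =>
        match PySem.List.pyGet? (u.map PySem.Chars.lowerChar) i with
        | some letter =>
          if PySem.Chars.isalpha letter then
            d.insert (String.ofList [letter]) (d.getD (String.ofList [letter]) 0 + 1)
          else d
        | none => d)
      PySem.Dict.empty
      = (PySem.List.pyRange 1 ((u.map PySem.Chars.lowerChar).length : Int) 2).foldl
      (fun (d : PySem.Dict String Int) i =>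
        pvStep d (PySem.List.pyGetD (u.map PySem.Chars.lowerChar) i 'a'))
      PySem.Dict.empty := by
    apply PySem.List.foldl_congr_mem
    intro acc i hi
    obtain ⟨h1i, h2i, -⟩ := (PySem.List.mem_pyRange_iff_of_pos (by norm_num : (0:Int) < 2) i).mp hi
    rw [PySem.List.pyGet?_eq_some_getElem (List.map PySem.Chars.lowerChar u) (i := i) (by omega) h2i,
        PySem.List.pyGetD_eq_getElem (List.map PySem.Chars.lowerChar u) (i := i) 'a' (by omega) h2i]
    simp [pvStep]
  rw [hbody, ← List.foldl_map, pv_map_range_odd, pvOdd_map, List.foldl_map]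
  -- B side: drop the whitespace guard, then run the parity fold
  have hguard : input_string.toList.foldl
      (fun (st : Bool × PySem.Dict String Int) c =>
        if PySem.Chars.isspace c then st
        else
          let d := if st.1 then
              (let ch := PySem.Chars.lowerChar c
               if PySem.Chars.isalpha ch then
                 st.2.insert (String.ofList [ch]) (st.2.getD (String.ofList [ch]) 0 + 1)
               else st.2)
            else st.2
          (!st.1, d))
      (false, PySem.Dict.empty)
      = u.foldl (fun (st : Bool × PySem.Dict String Int) c =>
          (!st.1, if st.1 then pvStep st.2 (PySem.Chars.lowerChar c) else st.2)) (false, PySem.Dict.empty) := by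
    rw [← hl, ← PySem.List.foldl_if_eq_foldl_filter]
    apply PySem.List.foldl_congr_mem
    intro acc c _
    by_cases hc : PySem.Chars.isspace c <;> simp [hc, pvStep]
  rw [hguard, pv_parity_fold]
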